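-- pv_equiv track=rewrite | github.com/kuparchad-gif/nexus-core | app/anynode/app/src/viren_sanctuary.py | decode_base13
-- ===== SOURCE A (Python) =====
-- BASE_13_DIGITS = "0123456789ABC"
--
-- def decode_base13(encoded: str) -> str:
--     """Decode base 13 back to consciousness data"""
--     decimal = 0
--     for digit in encoded:
--         decimal = decimal * 13 + BASE_13_DIGITS.index(digit)
--
--     binary = bin(decimal)[2:]
--     # Pad to multiple of 8
--     while len(binary) % 8 != 0:
--         binary = '0' + binary
--
--     chars = []
--     for i in range(0, len(binary), 8):
--         byte = binary[i:i+8]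
--         chars.append(chr(int(byte, 2)))
--
--     return ''.join(chars)
-- ===== SOURCE B (Python) =====
-- BASE_13_DIGITS = "0123456789ABC"
--
-- def decode_base13(encoded: str) -> str:
--     """Decode base 13 back to consciousness data"""
--     decimal = 0
--     for digit in encoded:
--         decimal = decimal * 13 + BASE_13_DIGITS.index(digit)
--     out = []
--     while decimal >= 256:
--         decimal, r = divmod(decimal, 256)
--         out.append(chr(r))
--     out.append(chr(decimal))
--     return ''.join(reversed(out))
-- ===== Notes on version B (the rewrite author's own statement) =====
-- stated objective: simpler
-- what changed: Keeps the base-13 Horner digit loop but replaces the binary-string build, zero-padding and 8-character chunk parsing by a single repeated divmod(decimal, 256) loop that emits the integer's bytes directly.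
import Mathlib
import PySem

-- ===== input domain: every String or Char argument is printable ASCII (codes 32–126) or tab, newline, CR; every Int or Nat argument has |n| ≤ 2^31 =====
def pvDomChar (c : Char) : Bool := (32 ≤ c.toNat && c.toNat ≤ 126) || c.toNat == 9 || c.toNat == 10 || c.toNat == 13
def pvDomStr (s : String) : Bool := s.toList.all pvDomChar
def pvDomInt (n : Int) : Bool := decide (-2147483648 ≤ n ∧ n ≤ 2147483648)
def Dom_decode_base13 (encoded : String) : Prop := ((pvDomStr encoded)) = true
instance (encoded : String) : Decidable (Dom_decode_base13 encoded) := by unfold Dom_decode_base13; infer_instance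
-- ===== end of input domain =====

-- B replaces A's binary-string build / zero-pad / 8-char-chunk machinery by a direct
-- repeated divmod-256 loop emitting the integer's bytes (simpler); the base-13 digit
-- loop is identical in A's and B's Python and is ported once as pvHorner13.

-- ===== PORT A =====
-- BASE_13_DIGITS.index(digit): str.index raises ValueError exactly where find = -1 (excluded by Pre_)
def pvIdx13 (c : Char) : Option Int :=
  if PySem.Chars.find "0123456789ABC".toList [c] = -1 then none
  else some (PySem.Chars.find "0123456789ABC".toList [c])

-- the Horner digit loop 'decimal = decimal * 13 + BASE_13_DIGITS.index(digit)', textually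
-- identical in A and in B, ported once; none = some digit was invalid (ValueError)
def pvHorner13 (cs : List Char) : Option Int :=
  cs.foldl (fun acc c => acc.bind fun d => (pvIdx13 c).map fun k => d * 13 + k) (some 0)

-- bin(decimal)[2:], built bit by bit (decimal is always ≥ 0 here: all digits are ≥ 0);
-- fuel is only a structural termination guard: fuel = n always suffices (n halves each step)
def pvBinGo (fuel : Nat) (n : Nat) : List Char :=
  match fuel with
  | 0 => []
  | fuel + 1 => if n = 0 then [] else pvBinGo fuel (n / 2) ++ [if n % 2 = 1 then '1' else '0']

def pvBin (n : Nat) : List Char := if n = 0 then ['0'] else pvBinGo n n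

-- while len(binary) % 8 != 0: binary = '0' + binary
-- fuel is only a structural termination guard: the loop prepends at most 7 zeros, fuel = 8 suffices
def pvPad (fuel : Nat) (s : List Char) : List Char :=
  match fuel with
  | 0 => s
  | fuel + 1 => if s.length % 8 = 0 then s else pvPad fuel ('0' :: s)

-- for i in range(0, len(binary), 8): chars.append(chr(int(binary[i:i+8], 2)))
-- chr(k) is Char.ofNat k (exact: k < 256 here); int(byte, 2) never raises here
-- (byte is a nonempty '0'/'1' string), so the .getD 0 branch is never taken
def pvChunks (s : List Char) : List Char :=
  (PySem.List.pyRange 0 (s.length) 8).foldl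
    (fun chars i => chars ++
      [Char.ofNat ((PySem.Int.ofCharsBase? (PySem.List.slice s (some i) (some (i + 8))) 2).getD 0).toNat]) []

def decode_base13 (encoded : String) : String :=
  match pvHorner13 encoded.toList with
  | none => ""   -- Python raises ValueError here; excluded by Pre_
  | some d => String.mk (pvChunks (pvPad 8 (pvBin d.toNat)))   -- ''.join(chars); d ≥ 0 always

-- ===== PORT B =====
-- while decimal >= 256: decimal, r = divmod(decimal, 256); out.append(chr(r))
-- then out.append(chr(decimal)); divmod on the nonnegative decimal is Nat div/mod
-- fuel is only a structural termination guard: decimal strictly decreases, fuel = decimal + 1 suffices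
def pvBytesLoop (fuel : Nat) (d : Nat) (out : List Char) : List Char :=
  match fuel with
  | 0 => out
  | fuel + 1 =>
    if 256 ≤ d then pvBytesLoop fuel (d / 256) (out ++ [Char.ofNat (d % 256)])
    else out ++ [Char.ofNat d]

def decode_base13_alt (encoded : String) : String :=
  match pvHorner13 encoded.toList with
  | none => ""   -- same ValueError; excluded by Pre_
  | some d => String.mk ((pvBytesLoop (d.toNat + 1) d.toNat []).reverse)   -- ''.join(reversed(out))

-- ===== PRECONDITION & SPEC =====
-- Pre_: every character is a valid base-13 digit; on any other character
-- BASE_13_DIGITS.index raises ValueError in both A and B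
def Pre_decode_base13 (encoded : String) : Prop :=
  (encoded.toList.all (fun c => "0123456789ABC".toList.contains c)) = true
instance (encoded : String) : Decidable (Pre_decode_base13 encoded) := by
  unfold Pre_decode_base13; infer_instance

def pvWitness_decode_base13 : String := "1A0C2"

def Spec_decode_base13 (encoded : String) (out : String) : Prop := out = decode_base13_alt encoded
instance (encoded : String) (out : String) : Decidable (Spec_decode_base13 encoded out) := by
  unfold Spec_decode_base13; infer_instance

-- ===== CLAIM (what is proved, stated in full; the proofs are below) =====
def Claim_equal_decode_base13 : Prop := ∀ (encoded : String), Dom_decode_base13 encoded → Pre_decode_base13 encoded → Spec_decode_base13 encoded (decode_base13 encoded)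

-- ===== LEMMAS AND PROOFS =====

-- proof-side twins of the three fueled loops, recursing on the loop's own measure
def pvBinGoW (n : Nat) : List Char :=
  if _h : n = 0 then [] else pvBinGoW (n / 2) ++ [if n % 2 = 1 then '1' else '0']
  decreasing_by exact Nat.div_lt_self (Nat.pos_of_ne_zero _h) one_lt_two

def pvBinW (n : Nat) : List Char := if n = 0 then ['0'] else pvBinGoW n

def pvPadW (s : List Char) : List Char :=
  if s.length % 8 = 0 then s else pvPadW ('0' :: s)
  termination_by (8 - s.length % 8) % 8
  decreasing_by simp only [List.length_cons]; omega

def pvBytesLoopW (d : Nat) (out : List Char) : List Char :=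
  if _h : 256 ≤ d then pvBytesLoopW (d / 256) (out ++ [Char.ofNat (d % 256)])
  else out ++ [Char.ofNat d]
  decreasing_by exact Nat.div_lt_self (by omega) (by omega)

theorem pvBinGo_bridge : ∀ fuel n, n ≤ fuel → pvBinGo fuel n = pvBinGoW n := by
  intro fuel
  induction fuel with
  | zero => intro n hn; have : n = 0 := by omega
            subst this; rw [pvBinGoW]; simp [pvBinGo]
  | succ fuel ih =>
    intro n hn
    by_cases h0 : n = 0
    · subst h0; rw [pvBinGoW]; simp [pvBinGo]
    · rw [pvBinGoW, dif_neg h0]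
      show (if n = 0 then [] else pvBinGo fuel (n / 2) ++ _) = _
      rw [if_neg h0, ih (n / 2) (by have := Nat.div_lt_self (Nat.pos_of_ne_zero h0) one_lt_two; omega)]

theorem pvBin_bridge (n : Nat) : pvBin n = pvBinW n := by
  unfold pvBin pvBinW
  by_cases h0 : n = 0
  · simp [h0]
  · rw [if_neg h0, if_neg h0, pvBinGo_bridge n n le_rfl]

theorem pvPad_bridge : ∀ fuel s, (8 - s.length % 8) % 8 < fuel → pvPad fuel s = pvPadW s := by
  intro fuel
  induction fuel with
  | zero => omega
  | succ fuel ih =>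
    intro s hs
    by_cases h : s.length % 8 = 0
    · rw [pvPadW, if_pos h]; show (if _ then s else _) = s; rw [if_pos h]
    · rw [pvPadW, if_neg h]
      show (if _ then s else pvPad fuel ('0' :: s)) = _
      rw [if_neg h, ih ('0' :: s) (by simp only [List.length_cons]; omega)]

theorem pvBytesLoop_bridge : ∀ fuel d out, d < fuel → pvBytesLoop fuel d out = pvBytesLoopW d out := by
  intro fuel
  induction fuel with
  | zero => omega
  | succ fuel ih =>
    intro d out hd
    by_cases h : 256 ≤ d
    · rw [pvBytesLoopW, dif_pos h]
      show (if _ then pvBytesLoop fuel (d / 256) _ else _) = _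
      rw [if_pos h, ih (d / 256) _ (by have := Nat.div_lt_self (by omega : 0 < d) (by omega : 1 < 256); omega)]
    · rw [pvBytesLoopW, dif_neg h]
      show (if _ then _ else out ++ [Char.ofNat d]) = _
      rw [if_neg h]

-- the k-bit big-endian bit string of m % 2^k (proof-side canonical form)
def cbBits (k : Nat) (m : Nat) : List Char :=
  match k with
  | 0 => []
  | k + 1 => cbBits k (m / 2) ++ [if m % 2 = 1 then '1' else '0']

theorem cbBits_length (k : Nat) : ∀ m, (cbBits k m).length = k := by
  induction k with
  | zero => intro m; rfl
  | succ k ih => intro m; simp [cbBits, ih]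

theorem pvBinGoW_len_le (k : Nat) : ∀ n, n < 2 ^ k → (pvBinGoW n).length ≤ k := by
  induction k with
  | zero => intro n hn; interval_cases n; simp [pvBinGoW]
  | succ k ih =>
    intro n hn
    by_cases h0 : n = 0
    · subst h0; simp [pvBinGoW]
    · rw [pvBinGoW]; rw [dif_neg h0]
      have : n / 2 < 2 ^ k := by
        rw [Nat.div_lt_iff_lt_mul (by omega)]; rw [pow_succ] at hn; omega
      have := ih (n / 2) this
      simp [List.length_append]; omega

theorem pvBinGoW_len_pos (n : Nat) (h0 : n ≠ 0) : 1 ≤ (pvBinGoW n).length := by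
  rw [pvBinGoW, dif_neg h0]; simp

theorem cbBits_eq (k : Nat) : ∀ n, n < 2 ^ k →
    cbBits k n = List.replicate (k - (pvBinGoW n).length) '0' ++ pvBinGoW n := by
  induction k with
  | zero => intro n hn; interval_cases n; simp [pvBinGoW, cbBits]
  | succ k ih =>
    intro n hn
    have hdiv : n / 2 < 2 ^ k := by
      rw [Nat.div_lt_iff_lt_mul (by omega)]; rw [pow_succ] at hn; omega
    by_cases h0 : n = 0
    · subst h0
      have : pvBinGoW 0 = [] := by rw [pvBinGoW]; simp
      have h2 := ih 0 (by positivity)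
      simp [this] at h2 ⊢
      show cbBits (k+1) 0 = List.replicate (k+1) '0'
      show cbBits k 0 ++ [if 0 % 2 = 1 then '1' else '0'] = _
      rw [h2]; simp [List.replicate_succ']
    · rw [pvBinGoW, dif_neg h0]
      show cbBits k (n / 2) ++ _ = _
      rw [ih (n / 2) hdiv]
      have hle : (pvBinGoW (n / 2)).length ≤ k := pvBinGoW_len_le k (n / 2) hdiv
      simp only [List.length_append, List.length_singleton]
      have : k + 1 - ((pvBinGoW (n / 2)).length + 1) = k - (pvBinGoW (n / 2)).length := by omega
      rw [this, List.append_assoc]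

theorem pvBinGoW_split (k : Nat) : ∀ n : Nat, 2 ^ k ≤ n →
    pvBinGoW n = pvBinGoW (n / 2 ^ k) ++ cbBits k (n % 2 ^ k) := by
  induction k with
  | zero => intro n _; simp [cbBits]
  | succ k ih =>
    intro n hn
    have h0 : n ≠ 0 := by have h2 : 0 < 2 ^ (k+1) := Nat.two_pow_pos (k+1); omega
    rw [pvBinGoW, dif_neg h0]
    have hk : 2 ^ k ≤ n / 2 := by
      rw [Nat.le_div_iff_mul_le (by omega)]; rw [pow_succ] at hn; omega
    rw [ih (n / 2) hk]
    have e1 : n / 2 / 2 ^ k = n / 2 ^ (k + 1) := by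
      rw [Nat.div_div_eq_div_mul, ← pow_succ']
    have e2 : n / 2 % 2 ^ k = n % 2 ^ (k + 1) / 2 := by
      rw [pow_succ']; exact (Nat.mod_mul_right_div_self n 2 (2^k)).symm
    have e3 : n % 2 = n % 2 ^ (k + 1) % 2 := by
      rw [Nat.mod_mod_of_dvd n (dvd_pow_self 2 (Nat.succ_ne_zero k))]
    rw [e1, e2, e3]
    show _ = pvBinGoW (n / 2 ^ (k+1)) ++ (cbBits k (n % 2 ^ (k+1) / 2) ++ [_])
    rw [← List.append_assoc]

theorem pvPadW_eq (s : List Char) :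
    pvPadW s = List.replicate ((8 - s.length % 8) % 8) '0' ++ s := by
  induction s using pvPadW.induct with
  | case1 s h =>
    rw [pvPadW, if_pos h]
    have : (8 - s.length % 8) % 8 = 0 := by omega
    rw [this]; rfl
  | case2 s h ih =>
    rw [pvPadW, if_neg h, ih]
    have : (8 - ('0' :: s).length % 8) % 8 + 1 = (8 - s.length % 8) % 8 := by
      simp only [List.length_cons]; omega
    rw [← this, List.replicate_succ']
    simp

theorem pvPadW_append (s t : List Char) (ht : t.length = 8) :
    pvPadW (s ++ t) = pvPadW s ++ t := by
  rw [pvPadW_eq, pvPadW_eq, List.length_append, ht, List.append_assoc]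
  have : (8 - (s.length + 8) % 8) % 8 = (8 - s.length % 8) % 8 := by omega
  rw [this]

theorem pvPadW_mod (s : List Char) : (pvPadW s).length % 8 = 0 := by
  rw [pvPadW_eq]; simp only [List.length_append, List.length_replicate]; omega

theorem pvChunks_eq_map (s : List Char) :
    pvChunks s = (PySem.List.pyRange 0 (s.length) 8).map
      (fun i => Char.ofNat ((PySem.Int.ofCharsBase? (PySem.List.slice s (some i) (some (i + 8))) 2).getD 0).toNat) := by
  unfold pvChunks
  rw [PySem.List.foldl_append_singleton_eq_map]
  rfl

theorem pyRange8 (m : Nat) :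
    PySem.List.pyRange 0 ((8 * m : Nat)) 8 = (List.range m).map (fun k => ((8 * k : Nat) : Int)) := by
  rw [PySem.List.pyRange_of_pos _ _ (by norm_num)]
  by_cases hm : m = 0
  · subst hm; simp
  · have hlt : (0:Int) < ((8 * m : Nat) : Int) := by
      have : 0 < 8 * m := by omega
      exact_mod_cast this
    rw [if_pos hlt]
    have : ((((8 * m : Nat) : Int) - 0 + 8 - 1) / 8).toNat = m := by push_cast; omega
    rw [this]
    apply List.map_congr_left
    intro k _
    push_cast; ring

theorem slice8 (xs : List Char) (j : Nat) :
    PySem.List.slice xs (some ((j:Int))) (some ((j:Int) + 8)) = (xs.drop j).take 8 := by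
  have h := PySem.List.slice_natCast_add xs j 8
  have e : ((j:Int) + ((8:Nat):Int)) = (j:Int) + 8 := by norm_num
  rw [e] at h; exact h

theorem pvChunks_append (s t : List Char) (hs : s.length % 8 = 0) (ht : t.length = 8) :
    pvChunks (s ++ t) = pvChunks s ++ [Char.ofNat ((PySem.Int.ofCharsBase? t 2).getD 0).toNat] := by
  obtain ⟨m, hm⟩ : ∃ m, s.length = 8 * m := ⟨s.length / 8, by omega⟩
  rw [pvChunks_eq_map, pvChunks_eq_map]
  have hlen : (s ++ t).length = 8 * (m + 1) := by simp [List.length_append, hm, ht]; omega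
  rw [hlen, hm, pyRange8, pyRange8, List.range_succ]
  simp only [List.map_append, List.map_map, List.map_cons, List.map_nil]
  congr 1
  · apply List.map_congr_left
    intro k hk
    have hk' : k < m := List.mem_range.mp hk
    simp only [Function.comp_apply]
    rw [slice8, slice8]
    rw [List.drop_append_of_le_length (by omega : 8 * k ≤ s.length)]
    rw [List.take_append_of_le_length (by simp [List.length_drop]; omega : 8 ≤ (s.drop (8 * k)).length)]
  · rw [slice8]
    have : 8 * m = s.length := hm.symm
    rw [this, List.drop_left]
    rw [← ht, List.take_length]

theorem pvChunks_single (t : List Char) (ht : t.length = 8) :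
    pvChunks t = [Char.ofNat ((PySem.Int.ofCharsBase? t 2).getD 0).toNat] := by
  have := pvChunks_append [] t (by simp) ht
  simpa [pvChunks, PySem.List.pyRange] using this

set_option maxRecDepth 40000 in
theorem parse_cbBits : ∀ b < 256, PySem.Int.ofCharsBase? (cbBits 8 b) 2 = some b := by decide

theorem pad_bin_small (n : Nat) (hn : n < 256) : pvPadW (pvBinW n) = cbBits 8 n := by
  have hn' : n < 2 ^ 8 := by norm_num; omega
  by_cases h0 : n = 0
  · subst h0
    have hgo : pvBinGoW 0 = [] := by rw [pvBinGoW]; simp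
    rw [cbBits_eq 8 0 (by norm_num), hgo]
    show pvPadW ['0'] = _
    rw [pvPadW_eq]
    simp [List.replicate_succ']
  · rw [cbBits_eq 8 n hn']
    show pvPadW (if n = 0 then ['0'] else pvBinGoW n) = _
    rw [if_neg h0, pvPadW_eq]
    have h1 := pvBinGoW_len_pos n h0
    have h2 := pvBinGoW_len_le 8 n hn'
    congr 1
    congr 1
    omega

theorem bytes_small (n : Nat) (hn : n < 256) : pvChunks (pvPadW (pvBinW n)) = [Char.ofNat n] := by
  rw [pad_bin_small n hn, pvChunks_single _ (cbBits_length 8 n), parse_cbBits n hn]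
  simp

theorem pvBytesLoopW_out (d : Nat) : ∀ out, pvBytesLoopW d out = out ++ pvBytesLoopW d [] := by
  induction d using Nat.strong_induction_on with
  | _ d ih =>
    intro out
    by_cases h : 256 ≤ d
    · conv_lhs => rw [pvBytesLoopW]
      conv_rhs => rw [pvBytesLoopW]
      rw [dif_pos h, dif_pos h]
      rw [ih (d / 256) (Nat.div_lt_self (by omega) (by omega)) (out ++ [Char.ofNat (d % 256)]),
          ih (d / 256) (Nat.div_lt_self (by omega) (by omega)) ([] ++ [Char.ofNat (d % 256)])]
      simp
    · conv_lhs => rw [pvBytesLoopW]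
      conv_rhs => rw [pvBytesLoopW]
      rw [dif_neg h, dif_neg h]
      simp

theorem bytes_main (n : Nat) : pvChunks (pvPadW (pvBinW n)) = (pvBytesLoopW n []).reverse := by
  induction n using Nat.strong_induction_on with
  | _ n ih =>
    by_cases h : n < 256
    · rw [bytes_small n h]
      conv_rhs => rw [pvBytesLoopW]
      rw [dif_neg (by omega : ¬ 256 ≤ n)]
      simp
    · have h256 : (256:Nat) ≤ n := by omega
      have h0 : n ≠ 0 := by omega
      have hq0 : n / 256 ≠ 0 := by
        have := Nat.le_div_iff_mul_le (by omega : 0 < 256) |>.mpr (by omega : 1 * 256 ≤ n)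
        omega
      have hsplit : pvBinGoW n = pvBinGoW (n / 256) ++ cbBits 8 (n % 256) := by
        have h8 : (2:Nat) ^ 8 = 256 := by norm_num
        have := pvBinGoW_split 8 n (by rw [h8]; exact h256)
        rwa [h8] at this
      have hbin : pvBinW n = pvBinGoW n := by rw [pvBinW, if_neg h0]
      have hbinq : pvBinW (n / 256) = pvBinGoW (n / 256) := by rw [pvBinW, if_neg hq0]
      rw [hbin, hsplit, pvPadW_append _ _ (cbBits_length 8 _),
          pvChunks_append _ _ (pvPadW_mod _) (cbBits_length 8 _),
          parse_cbBits (n % 256) (Nat.mod_lt _ (by omega)), ← hbinq,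
          ih (n / 256) (Nat.div_lt_self (by omega) (by omega))]
      conv_rhs => rw [pvBytesLoopW]
      rw [dif_pos h256, pvBytesLoopW_out (n / 256) ([] ++ [Char.ofNat (n % 256)])]
      have hcast : ((n:Int) % 256).toNat = n % 256 := by omega
      simp [hcast]

-- ===== VERDICT (by name: the statement is the Claim_ definition above) =====
theorem decode_base13_spec : Claim_equal_decode_base13 := by
  intro encoded _ _
  unfold Spec_decode_base13 decode_base13 decode_base13_alt
  cases pvHorner13 encoded.toList with
  | none => rfl
  | some d =>
    show String.mk (pvChunks (pvPad 8 (pvBin d.toNat)))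
       = String.mk (pvBytesLoop (d.toNat + 1) d.toNat []).reverse
    rw [pvBin_bridge, pvPad_bridge 8 _ (by omega), bytes_main d.toNat,
        pvBytesLoop_bridge (d.toNat + 1) d.toNat [] (by omega)]
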